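-- pv_equiv track=rewrite | github.com/jola2802/LLM2ML-Platform | services/mas-service/core/execution/code_validator.py | _fix_except_without_try
-- ===== SOURCE A (Python) =====
-- def _fix_except_without_try(code: str) -> str:
--     """Korrigiert except-Blöcke ohne try"""
--     lines = code.split('\n')
--     fixed_lines = []
--     i = 0
--
--     while i < len(lines):
--         line = lines[i].strip()
--
--         # Wenn except gefunden, prüfe ob try davor existiert
--         if line.startswith('except'):
--             # Suche nach try in den letzten 20 Zeilen
--             has_try = False
--             for j in range(max(0, len(fixed_lines) - 20), len(fixed_lines)):
--                 if 'try:' in fixed_lines[j] or 'try ' in fixed_lines[j]: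
--                     has_try = True
--                     break
--
--             if not has_try:
--                 # Füge try vor except ein
--                 indent = len(lines[i]) - len(lines[i].lstrip())
--                 try_indent = max(0, indent - 4)
--                 fixed_lines.append(' ' * try_indent + 'try:')
--                 fixed_lines.append(' ' * (try_indent + 4) + 'pass')
--
--         fixed_lines.append(lines[i])
--         i += 1
--
--     return '\n'.join(fixed_lines)
-- ===== SOURCE B (Python) =====
-- def _fix_except_without_try(code: str) -> str:
--     """Korrigiert except-Bloecke ohne try.
--     One pass: instead of rescanning the last 20 appended lines at every
--     'except', keep last_try, the index in fixed of the most recently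
--     appended line containing 'try:' or 'try ' (a very negative sentinel
--     when there is none); the 20-line window test becomes one comparison."""
--     fixed = []
--     last_try = -1000000000
--     for raw in code.split('\n'):
--         if raw.strip().startswith('except') and last_try < len(fixed) - 20:
--             indent = len(raw) - len(raw.lstrip())
--             ti = max(0, indent - 4)
--             fixed.append(' ' * ti + 'try:')
--             last_try = len(fixed) - 1
--             fixed.append(' ' * (ti + 4) + 'pass')
--         if 'try:' in raw or 'try ' in raw:
--             fixed.append(raw)
--             last_try = len(fixed) - 1
--         else:
--             fixed.append(raw)
--     return '\n'.join(fixed)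
-- ===== Notes on version B (the rewrite author's own statement) =====
-- stated objective: alternative
-- what changed: B replaces A's per-'except' rescan of the last 20 appended lines with a single pass that maintains last_try, the index of the most recently appended line containing 'try:' or 'try ', so the window test is one integer comparison.
import Mathlib
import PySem

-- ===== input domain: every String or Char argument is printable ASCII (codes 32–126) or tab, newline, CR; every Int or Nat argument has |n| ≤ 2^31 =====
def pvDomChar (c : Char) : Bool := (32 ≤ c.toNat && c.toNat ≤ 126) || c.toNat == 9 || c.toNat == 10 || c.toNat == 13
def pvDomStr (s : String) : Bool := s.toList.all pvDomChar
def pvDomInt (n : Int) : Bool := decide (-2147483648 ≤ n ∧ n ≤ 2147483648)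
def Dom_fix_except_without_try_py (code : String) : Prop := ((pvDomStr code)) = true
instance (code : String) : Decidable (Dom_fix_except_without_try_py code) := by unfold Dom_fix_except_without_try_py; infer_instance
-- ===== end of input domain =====

-- B does one pass with a last-try index instead of rescanning the 20-line window at each 'except' (alternative decomposition, same cost class).

-- ===== PORT A =====
-- shared small helpers (both Pythons use the same marker test and build the same lines)
-- "'try:' in s or 'try ' in s"
def pvMark (s : String) : Bool := PySem.Str.isIn "try:" s || PySem.Str.isIn "try " s
-- "' ' * n + tail" built as one literal string (n ≥ 0 at every use site)
def pvLine (n : Int) (tail : List Char) : String := String.ofList (List.replicate n.toNat ' ' ++ tail)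

-- one iteration of A's while-loop body (fixed_lines is the accumulator)
def pvStepA (fixed : List String) (ln : String) : List String :=
  let line := PySem.Str.strip ln
  let fixed :=
    if PySem.Str.startswith line "except" then
      -- for j in range(max(0, len(fixed)-20), len(fixed)): if mark: has_try = True; break
      let hasTry := (PySem.List.pyRange (max 0 ((fixed.length : Int) - 20)) (fixed.length : Int) 1).any
          (fun j => pvMark (PySem.List.pyGetD fixed j ""))
      if !hasTry then
        let indent := PySem.Str.len ln - PySem.Str.len (PySem.Str.lstrip ln)
        let tryIndent := max 0 (indent - 4)
        fixed ++ [pvLine tryIndent ['t','r','y',':'], pvLine (tryIndent + 4) ['p','a','s','s']]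
      else fixed
    else fixed
  fixed ++ [ln]

def fix_except_without_try_py (code : String) : String :=
  PySem.Str.join "\n" (((PySem.Str.split? code "\n").getD []).foldl pvStepA [])

-- ===== PORT B =====
-- one iteration of B's for-loop body: state = (fixed, last_try)
def pvStepB (st : List String × Int) (ln : String) : List String × Int :=
  let fixed := st.1
  let lastTry := st.2
  let st :=
    if PySem.Str.startswith (PySem.Str.strip ln) "except" && decide (lastTry < (fixed.length : Int) - 20) then
      let indent := PySem.Str.len ln - PySem.Str.len (PySem.Str.lstrip ln)
      let ti := max 0 (indent - 4)
      (fixed ++ [pvLine ti ['t','r','y',':'], pvLine (ti + 4) ['p','a','s','s']], ((fixed.length : Int)))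
    else (fixed, lastTry)
  if pvMark ln then (st.1 ++ [ln], (st.1.length : Int)) else (st.1 ++ [ln], st.2)

def fix_except_without_try_py_alt (code : String) : String :=
  PySem.Str.join "\n" ((((PySem.Str.split? code "\n").getD []).foldl pvStepB ([], -1000000000)).1)

-- ===== PRECONDITION & SPEC =====
def Spec_fix_except_without_try_py (code : String) (out : String) : Prop := out = fix_except_without_try_py_alt code
instance (code : String) (out : String) : Decidable (Spec_fix_except_without_try_py code out) := by unfold Spec_fix_except_without_try_py; infer_instance

-- ===== CLAIM (what is proved, stated in full; the proofs are below) =====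
def Claim_equal_fix_except_without_try_py : Prop := ∀ (code : String), Dom_fix_except_without_try_py code → Spec_fix_except_without_try_py code (fix_except_without_try_py code)

-- ===== LEMMAS AND PROOFS =====

-- Invariant tying B's last_try to A's accumulator: either no appended line is
-- marked (sentinel), or last_try is the greatest index of a marked line.
def pvInv (p : String → Bool) (l : List String) (lt : Int) : Prop :=
  (lt = -1000000000 ∧ ∀ s ∈ l, p s = false) ∨
  (∃ m : Nat, lt = (m : Int) ∧ m < l.length ∧ p (l.getD m "") = true ∧
    ∀ j : Nat, m < j → j < l.length → p (l.getD j "") = false)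

theorem pvScan_eq (p : String → Bool) (l : List String) (lt : Int) (h : pvInv p l lt) :
    ((PySem.List.pyRange (max 0 ((l.length : Int) - 20)) (l.length : Int) 1).any
      (fun j => p (PySem.List.pyGetD l j ""))) = decide ((l.length : Int) - 20 ≤ lt) := by
  have hmem : ∀ x : Int, x ∈ PySem.List.pyRange (max 0 ((l.length : Int) - 20)) (l.length : Int) 1 ↔
      max 0 ((l.length : Int) - 20) ≤ x ∧ x < (l.length : Int) := by
    intro x
    rw [PySem.List.mem_pyRange_iff_of_pos (by norm_num)]
    simp
  have hget : ∀ x : Int, 0 ≤ x → PySem.List.pyGetD l x "" = l.getD x.toNat "" := by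
    intro x hx
    conv_lhs => rw [show x = ((x.toNat : Nat) : Int) from (Int.toNat_of_nonneg hx).symm]
    rw [PySem.List.pyGetD_natCast]
  rcases h with ⟨hlt, hall⟩ | ⟨m, hlt, hm, hpm, haft⟩
  · subst hlt
    rw [decide_eq_false (by have := Int.natCast_nonneg l.length; omega)]
    rw [List.any_eq_false]
    intro x hx
    rw [hmem] at hx
    have hx0 : 0 ≤ x := le_trans (le_max_left _ _) hx.1
    rw [hget x hx0]
    have hlen : x.toNat < l.length := by omega
    rw [List.getD_eq_getElem l "" hlen]
    exact Bool.eq_false_iff.mp (hall _ (List.getElem_mem hlen))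
  · subst hlt
    by_cases hle : (l.length : Int) - 20 ≤ (m : Int)
    · rw [decide_eq_true hle, List.any_eq_true]
      refine ⟨(m : Int), ?_, ?_⟩
      · rw [hmem]
        exact ⟨max_le (Int.natCast_nonneg m) hle, by exact_mod_cast hm⟩
      · rw [hget _ (Int.natCast_nonneg m)]
        simpa using hpm
    · rw [decide_eq_false hle, List.any_eq_false]
      intro x hx
      rw [hmem] at hx
      have hx0 : 0 ≤ x := le_trans (le_max_left _ _) hx.1
      rw [hget x hx0]
      have h1 : m < x.toNat := by
        have := le_trans (le_max_right _ _) hx.1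
        omega
      exact Bool.eq_false_iff.mp (haft x.toNat h1 (by omega))

theorem pvInv_append (p : String → Bool) (l : List String) (lt : Int) (s : String)
    (h : pvInv p l lt) : pvInv p (l ++ [s]) (if p s then (l.length : Int) else lt) := by
  have hgetL : ∀ j : Nat, j < l.length → (l ++ [s]).getD j "" = l.getD j "" := by
    intro j hj; exact List.getD_append _ _ _ _ hj
  have hgetR : (l ++ [s]).getD l.length "" = s := by
    rw [List.getD_append_right _ _ _ _ (le_refl _)]; simp [List.getD]
  by_cases hs : p s = true
  · rw [if_pos hs]
    right
    refine ⟨l.length, rfl, by simp, by rw [hgetR]; exact hs, ?_⟩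
    intro j hj1 hj2
    simp at hj2
    omega
  · rw [if_neg hs]
    rcases h with ⟨hlt, hall⟩ | ⟨m, hlt, hm, hpm, haft⟩
    · left
      refine ⟨hlt, ?_⟩
      intro x hx
      rcases List.mem_append.mp hx with hx | hx
      · exact hall x hx
      · simp at hx; subst hx; exact Bool.eq_false_iff.mpr hs
    · right
      refine ⟨m, hlt, by simp; omega, by rw [hgetL m hm]; exact hpm, ?_⟩
      intro j hj1 hj2
      simp at hj2
      rcases Nat.lt_or_ge j l.length with hj | hj
      · rw [hgetL j hj]; exact haft j hj1 hj
      · have : j = l.length := by omega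
        subst this
        rw [hgetR]; exact Bool.eq_false_iff.mpr hs

theorem pvMark_try (n : Int) : pvMark (pvLine n ['t','r','y',':']) = true := by
  simp only [pvMark, pvLine, Bool.or_eq_true, PySem.Str.isIn_eq, String.toList_ofList]
  left
  rw [PySem.Chars.isIn_iff_infix]
  exact (List.suffix_append _ _).isInfix

theorem pvNoT (n : Int) (sub : List Char) (hsub : 't' ∈ sub)
    (h : sub <:+: (List.replicate n.toNat ' ' ++ ['p','a','s','s'])) : False := by
  have hmem := h.subset hsub
  rcases List.mem_append.mp hmem with h1 | h1
  · exact absurd (List.eq_of_mem_replicate h1) (by decide)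
  · simp at h1

theorem pvMark_pass (n : Int) : pvMark (pvLine n ['p','a','s','s']) = false := by
  simp only [pvMark, pvLine, Bool.or_eq_false_iff, PySem.Str.isIn_eq, String.toList_ofList]
  constructor
  · rw [PySem.Chars.isIn_eq_false_iff]
    exact fun hc => pvNoT n _ (by decide) hc
  · rw [PySem.Chars.isIn_eq_false_iff]
    exact fun hc => pvNoT n _ (by decide) hc

theorem pvFold_eq (lines : List String) (fixed : List String) (lt : Int)
    (h : pvInv pvMark fixed lt) :
    lines.foldl pvStepA fixed = (lines.foldl pvStepB (fixed, lt)).1 := by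
  induction lines generalizing fixed lt with
  | nil => rfl
  | cons ln rest ih =>
    simp only [List.foldl_cons]
    have hscan := pvScan_eq pvMark fixed lt h
    have happ := pvInv_append pvMark fixed lt ln h
    by_cases hc : PySem.Str.startswith (PySem.Str.strip ln) "except" = true
    · by_cases hca : (fixed.length : Int) - 20 ≤ lt
      · have hnot : decide (lt < (fixed.length : Int) - 20) = false :=
          decide_eq_false (not_lt.mpr hca)
        have htrue : decide ((fixed.length : Int) - 20 ≤ lt) = true := decide_eq_true hca
        rw [htrue] at hscan
        simp only [pvStepA, pvStepB, hc, hscan, hnot, Bool.and_false, Bool.not_true,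
          Bool.false_eq_true, if_false, if_true]
        by_cases hm : pvMark ln = true
        · simp only [hm, if_true]
          rw [hm, if_pos rfl] at happ
          exact ih _ _ happ
        · have hmf : pvMark ln = false := Bool.eq_false_iff.mpr hm
          simp only [hmf, Bool.false_eq_true, if_false]
          rw [hmf, if_neg (by simp)] at happ
          exact ih _ _ happ
      · have hpos : decide (lt < (fixed.length : Int) - 20) = true := decide_eq_true (not_le.mp hca)
        have hfalse : decide ((fixed.length : Int) - 20 ≤ lt) = false :=
          decide_eq_false hca
        rw [hfalse] at hscan
        simp only [pvStepA, pvStepB, hc, hscan, hpos, Bool.and_true, Bool.not_false,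
          if_true]
        have i1 := pvInv_append pvMark fixed lt
          (pvLine (max 0 (PySem.Str.len ln - PySem.Str.len (PySem.Str.lstrip ln) - 4))
            ['t','r','y',':']) h
        rw [pvMark_try, if_pos rfl] at i1
        have i2 := pvInv_append pvMark _ ((fixed.length : Int))
          (pvLine (max 0 (PySem.Str.len ln - PySem.Str.len (PySem.Str.lstrip ln) - 4) + 4)
            ['p','a','s','s']) i1
        rw [pvMark_pass, if_neg (by simp)] at i2
        rw [List.append_assoc] at i2
        have i3 := pvInv_append pvMark _ ((fixed.length : Int)) ln i2
        by_cases hm : pvMark ln = true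
        · simp only [hm, if_true]
          rw [hm, if_pos rfl] at i3
          exact ih _ _ i3
        · have hmf : pvMark ln = false := Bool.eq_false_iff.mpr hm
          simp only [hmf, Bool.false_eq_true, if_false]
          rw [hmf, if_neg (by simp)] at i3
          exact ih _ _ i3
    · have hcf : PySem.Str.startswith (PySem.Str.strip ln) "except" = false :=
        Bool.eq_false_iff.mpr hc
      simp only [pvStepA, pvStepB, hcf, Bool.false_and, Bool.false_eq_true, if_false]
      by_cases hm : pvMark ln = true
      · simp only [hm, if_true]
        rw [hm, if_pos rfl] at happ
        exact ih _ _ happ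
      · have hmf : pvMark ln = false := Bool.eq_false_iff.mpr hm
        simp only [hmf, Bool.false_eq_true, if_false]
        rw [hmf, if_neg (by simp)] at happ
        exact ih _ _ happ

-- ===== VERDICT (by name: the statement is the Claim_ definition above) =====
theorem fix_except_without_try_py_spec : Claim_equal_fix_except_without_try_py := by
  intro code _
  unfold Spec_fix_except_without_try_py fix_except_without_try_py fix_except_without_try_py_alt
  rw [pvFold_eq _ _ _ (Or.inl ⟨rfl, by intro s hs; simp at hs⟩)]
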